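-- pv_equiv track=rewrite | github.com/pypi-data/pypi-mirror-339 | packages/mag-tools/mag_tools-0.3.142-py3-none-any.whl/mag_tools/utils/common/list_utils.py | split_by_keywords
-- ===== SOURCE A (Python) =====
-- from typing import Any, List, Optional, Dict, Tuple
--
-- def split_by_keywords(lines: List[str], keywords: List[str]) -> Dict[str, List[str]]:
--     segments = {keyword: [] for keyword in keywords}
--     current_keyword = None
--
--     for line in lines:
--         if line in keywords:
--             current_keyword = line
--         segments[current_keyword].append(line)
--
--     return segments
-- ===== SOURCE B (Python) =====
-- def split_by_keywords(lines, keywords):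
--     segments = {keyword: [] for keyword in keywords}
--     rest = lines
--     while rest:
--         kw = rest[0]
--         i = 1
--         while i < len(rest) and rest[i] not in keywords:
--             i += 1
--         segments[kw].extend(rest[:i])
--         rest = rest[i:]
--     return segments
-- ===== Notes on version B (the rewrite author's own statement) =====
-- stated objective: alternative
-- what changed: B replaces A's line-by-line loop carrying a current-keyword state (one dict append per line) with an outer loop that scans each keyword-headed chunk as a whole (inner scan finds the next keyword) and extends the segment with one slice per chunk.
import Mathlib
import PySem

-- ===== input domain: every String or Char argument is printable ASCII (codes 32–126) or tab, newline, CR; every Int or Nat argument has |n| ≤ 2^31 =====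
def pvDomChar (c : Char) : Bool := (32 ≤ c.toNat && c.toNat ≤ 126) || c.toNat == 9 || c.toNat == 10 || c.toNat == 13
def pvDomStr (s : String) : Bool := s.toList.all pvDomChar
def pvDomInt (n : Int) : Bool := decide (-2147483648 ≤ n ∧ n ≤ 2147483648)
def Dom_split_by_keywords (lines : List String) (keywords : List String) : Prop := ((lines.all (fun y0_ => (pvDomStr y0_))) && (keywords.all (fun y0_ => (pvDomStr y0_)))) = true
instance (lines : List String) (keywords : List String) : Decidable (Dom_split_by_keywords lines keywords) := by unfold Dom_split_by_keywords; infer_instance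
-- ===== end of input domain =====

-- B groups lines into keyword-headed chunks and extends segments one slice at a time,
-- instead of A's per-line loop with a current-keyword state; same cost, different decomposition.

-- ===== PORT A =====
def split_by_keywords (lines : List String) (keywords : List String) : List (String × List String) :=
  -- segments = {keyword: [] for keyword in keywords}
  let segments : PySem.Dict String (List String) :=
    keywords.foldl (fun d k => d.insert k ([] : List String)) PySem.Dict.empty
  -- for line in lines: if line in keywords: current_keyword = line; segments[current_keyword].append(line)
  (lines.foldl
    (fun (st : PySem.Dict String (List String) × Option String) line =>
      let cur := if keywords.contains line then some line else st.2
      match cur with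
      | some k => (st.1.modify k [] (fun v => v ++ [line]), some k)
      | none => (st.1, none))   -- segments[None] raises KeyError in Python; excluded by Pre_
    (segments, none)).1.items

-- ===== PORT B =====
-- inner while: i = 1; while i < len(rest) and rest[i] not in keywords: i += 1  — pvSpan counts the steps past index 1
def pvSpan (keywords : List String) : List String → Nat
  | [] => 0
  | x :: tl => if keywords.contains x then 0 else pvSpan keywords tl + 1

def pvAltGo (keywords : List String) (segments : PySem.Dict String (List String)) :
    List String → PySem.Dict String (List String)
  | [] => segments
  | kw :: tl =>
      -- segments[kw].extend(rest[:i]); rest = rest[i:]   (KeyError for kw not a key: excluded by Pre_)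
      let i := pvSpan keywords tl + 1
      pvAltGo keywords (segments.modify kw [] (fun v => v ++ (kw :: tl).take i)) ((kw :: tl).drop i)
  termination_by rest => rest.length
  decreasing_by simp [List.drop_succ_cons]

def split_by_keywords_alt (lines : List String) (keywords : List String) : List (String × List String) :=
  let segments : PySem.Dict String (List String) :=
    keywords.foldl (fun d k => d.insert k ([] : List String)) PySem.Dict.empty
  (pvAltGo keywords segments lines).items

-- ===== PRECONDITION & SPEC =====
-- Pre_ excludes exactly the inputs where A raises KeyError(None): a non-empty lines whose first
-- line is not a keyword (B raises KeyError there too).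
def Pre_split_by_keywords (lines : List String) (keywords : List String) : Prop :=
  (match lines with | [] => true | h :: _ => keywords.contains h) = true
instance (lines : List String) (keywords : List String) : Decidable (Pre_split_by_keywords lines keywords) := by unfold Pre_split_by_keywords; infer_instance

def pvWitness_split_by_keywords : List String × List String := (["k", "a", "b", "k", "c"], ["k", "m"])

def Spec_split_by_keywords (lines : List String) (keywords : List String) (out : List (String × List String)) : Prop := out = split_by_keywords_alt lines keywords
instance (lines : List String) (keywords : List String) (out : List (String × List String)) : Decidable (Spec_split_by_keywords lines keywords out) := by unfold Spec_split_by_keywords; infer_instance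

-- ===== CLAIM (what is proved, stated in full; the proofs are below) =====
def Claim_equal_split_by_keywords : Prop := ∀ (lines : List String) (keywords : List String), Dom_split_by_keywords lines keywords → Pre_split_by_keywords lines keywords → Spec_split_by_keywords lines keywords (split_by_keywords lines keywords)

-- ===== LEMMAS AND PROOFS =====

-- A's loop body, named for the lemmas (definitionally the lambda inside split_by_keywords)
def stepA (keywords : List String) (st : PySem.Dict String (List String) × Option String)
    (line : String) : PySem.Dict String (List String) × Option String :=
  let cur := if keywords.contains line then some line else st.2
  match cur with
  | some k => (st.1.modify k [] (fun v => v ++ [line]), some k)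
  | none => (st.1, none)

lemma pvAltGo_nil (keywords : List String) (d : PySem.Dict String (List String)) :
    pvAltGo keywords d [] = d := by rw [pvAltGo]

lemma pvAltGo_cons (keywords : List String) (d : PySem.Dict String (List String))
    (kw : String) (tl : List String) :
    pvAltGo keywords d (kw :: tl)
      = pvAltGo keywords (d.modify kw [] (fun v => v ++ (kw :: tl).take (pvSpan keywords tl + 1)))
          ((kw :: tl).drop (pvSpan keywords tl + 1)) := by rw [pvAltGo]

lemma modify_modify_self {κ ν : Type} [BEq κ] [LawfulBEq κ] (d : PySem.Dict κ ν) (k : κ)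
    (d0 : ν) (f g : ν → ν) :
    (d.modify k d0 f).modify k d0 g = d.modify k d0 (fun v => g (f v)) := by
  simp [PySem.Dict.modify, PySem.Dict.getD_insert_self, PySem.Dict.insert_insert_self]

lemma span_drop (keywords : List String) : ∀ (l : List String),
    l.drop (pvSpan keywords l) = [] ∨
    ∃ h t, l.drop (pvSpan keywords l) = h :: t ∧ keywords.contains h = true := by
  intro l
  induction l with
  | nil => exact Or.inl rfl
  | cons x tl ih =>
      by_cases hm : x ∈ keywords
      · exact Or.inr ⟨x, tl, by simp [pvSpan, hm], by simpa using hm⟩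
      · simpa [pvSpan, hm] using ih

lemma chunkL (keywords : List String) : ∀ (tl : List String)
    (d : PySem.Dict String (List String)) (k : String) (pre : List String),
    tl.foldl (stepA keywords) (d.modify k [] (fun v => v ++ pre), some k)
      = (tl.drop (pvSpan keywords tl)).foldl (stepA keywords)
          (d.modify k [] (fun v => v ++ (pre ++ tl.take (pvSpan keywords tl))), some k) := by
  intro tl
  induction tl with
  | nil => simp
  | cons x tl ih =>
      intro d k pre
      by_cases hm : x ∈ keywords
      · simp [pvSpan, hm]
      · have hstep : stepA keywords (d.modify k [] (fun v => v ++ pre), some k) x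
            = (d.modify k [] (fun v => v ++ (pre ++ [x])), some k) := by
          simp only [stepA, List.contains_eq_mem, hm, decide_false, Bool.false_eq_true, if_false]
          rw [modify_modify_self]
          simp
        calc (x :: tl).foldl (stepA keywords) (d.modify k [] (fun v => v ++ pre), some k)
            = tl.foldl (stepA keywords) (d.modify k [] (fun v => v ++ (pre ++ [x])), some k) := by
              rw [List.foldl_cons, hstep]
          _ = (tl.drop (pvSpan keywords tl)).foldl (stepA keywords)
                (d.modify k [] (fun v => v ++ ((pre ++ [x]) ++ tl.take (pvSpan keywords tl))), some k) := ih d k (pre ++ [x])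
          _ = ((x :: tl).drop (pvSpan keywords (x :: tl))).foldl (stepA keywords)
                (d.modify k [] (fun v => v ++ (pre ++ (x :: tl).take (pvSpan keywords (x :: tl)))), some k) := by
              simp [pvSpan, hm]

lemma mainL (keywords : List String) : ∀ (n : Nat) (rest : List String), rest.length ≤ n →
    (rest = [] ∨ ∃ h t, rest = h :: t ∧ keywords.contains h = true) →
    ∀ (d : PySem.Dict String (List String)) (cur : Option String),
      (rest.foldl (stepA keywords) (d, cur)).1 = pvAltGo keywords d rest := by
  intro n
  induction n with
  | zero =>
      intro rest hlen _ d cur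
      have : rest = [] := List.eq_nil_of_length_eq_zero (Nat.le_zero.mp hlen)
      subst this; simp [pvAltGo_nil]
  | succ n ih =>
      intro rest hlen hhead d cur
      rcases hhead with h0 | ⟨kw, tl, rfl, hkw⟩
      · subst h0; simp [pvAltGo_nil]
      · have hm : kw ∈ keywords := by simpa using hkw
        have hstep : stepA keywords (d, cur) kw
            = (d.modify kw [] (fun v => v ++ [kw]), some kw) := by
          simp [stepA, hm]
        rw [List.foldl_cons, hstep, chunkL]
        have hlen' : (tl.drop (pvSpan keywords tl)).length ≤ n := by
          simp only [List.length_drop]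
          simp at hlen
          omega
        rw [ih _ hlen' (span_drop keywords tl), pvAltGo_cons]
        simp [List.take_succ_cons, List.drop_succ_cons]

-- ===== VERDICT (by name: the statement is the Claim_ definition above) =====
theorem split_by_keywords_spec : Claim_equal_split_by_keywords := by
  intro lines keywords _ hpre
  unfold Spec_split_by_keywords split_by_keywords split_by_keywords_alt
  cases lines with
  | nil => simp [pvAltGo_nil]
  | cons h t =>
      have hkw : keywords.contains h = true := by
        simpa [Pre_split_by_keywords] using hpre
      show (List.foldl (stepA keywords) (keywords.foldl (fun d k => d.insert k ([] : List String)) PySem.Dict.empty, none) (h :: t)).1.items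
          = (pvAltGo keywords (keywords.foldl (fun d k => d.insert k ([] : List String)) PySem.Dict.empty) (h :: t)).items
      rw [mainL keywords (h :: t).length (h :: t) le_rfl (Or.inr ⟨h, t, rfl, hkw⟩)]
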